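-- pv_equiv track=rewrite | github.com/rojbar/SC | Corridas.py | contarCorridas
-- ===== SOURCE A (Python) =====
-- def contarCorridas(datos):
--     positivo = 0
--     negativo = 0
--     anterior = 0
--     corridas = 0
--     for index,dato in enumerate(datos):
--         if(dato == '+'):
--             positivo += 1
--         else:
--             negativo += 1
--
--         if(index == 0):
--             anterior = dato
--             continue
--         if(dato != anterior):
--             corridas += 1
--
--         anterior = dato
--     return [positivo, negativo, corridas]
-- ===== SOURCE B (Python) =====
-- def contarCorridas(datos):
--     positivo = datos.count('+')
--     negativo = len(datos) - positivo
--     corridas = sum(1 for a, b in zip(datos, datos[1:]) if a != b)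
--     return [positivo, negativo, corridas]
-- ===== Notes on version B (the rewrite author's own statement) =====
-- stated objective: simpler
-- what changed: Replaces the single fused loop with index-0 guard and 'anterior' bookkeeping by three independent library passes: count('+'), a length subtraction, and a zip of adjacent pairs.
import Mathlib
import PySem

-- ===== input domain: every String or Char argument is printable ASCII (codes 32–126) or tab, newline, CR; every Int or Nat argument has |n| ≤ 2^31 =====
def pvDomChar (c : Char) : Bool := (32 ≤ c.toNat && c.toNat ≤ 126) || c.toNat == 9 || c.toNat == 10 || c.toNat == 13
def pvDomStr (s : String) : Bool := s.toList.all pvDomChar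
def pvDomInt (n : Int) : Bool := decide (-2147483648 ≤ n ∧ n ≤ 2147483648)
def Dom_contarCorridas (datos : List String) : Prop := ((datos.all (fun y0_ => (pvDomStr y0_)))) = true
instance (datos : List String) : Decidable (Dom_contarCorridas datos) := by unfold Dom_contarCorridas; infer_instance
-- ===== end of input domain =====

-- B replaces A's fused loop (index-0 guard, 'anterior' bookkeeping) with three
-- independent passes: count('+'), a length subtraction, and a zip of adjacent
-- pairs; objective: simpler.

-- ===== PORT A =====
-- A's loop state (positivo, negativo, anterior, corridas); 'anterior' is only
-- read after the index-0 iteration has set it to a string, so it is typed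
-- String with a dummy initial value "".
def contarCorridas (datos : List String) : List Int :=
  let s := (PySem.List.enumerate datos).foldl
    (fun (st : Int × Int × String × Int) (p : Int × String) =>
      let positivo := if p.2 = "+" then st.1 + 1 else st.1
      let negativo := if p.2 = "+" then st.2.1 else st.2.1 + 1
      if p.1 = 0 then (positivo, negativo, p.2, st.2.2.2)
      else if p.2 ≠ st.2.2.1 then (positivo, negativo, p.2, st.2.2.2 + 1)
      else (positivo, negativo, p.2, st.2.2.2))
    (0, 0, "", 0)
  [s.1, s.2.1, s.2.2.2]

-- ===== PORT B =====
def contarCorridas_alt (datos : List String) : List Int :=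
  let positivo : Int := (PySem.List.count datos "+" : Int)
  let negativo : Int := (datos.length : Int) - positivo
  let corridas : Int :=
    (((datos.zip (PySem.List.slice datos (some 1) none)).filter
        (fun p => p.1 ≠ p.2)).length : Int)
  [positivo, negativo, corridas]

-- ===== PRECONDITION & SPEC =====
def Spec_contarCorridas (datos : List String) (out : List Int) : Prop := out = contarCorridas_alt datos
instance (datos : List String) (out : List Int) : Decidable (Spec_contarCorridas datos out) := by unfold Spec_contarCorridas; infer_instance

-- ===== CLAIM (what is proved, stated in full; the proofs are below) =====
def Claim_equal_contarCorridas : Prop := ∀ (datos : List String), Dom_contarCorridas datos → Spec_contarCorridas datos (contarCorridas datos)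

-- ===== LEMMAS AND PROOFS =====

-- the loop body of port A, named for the proofs
def pvBodyA : Int × Int × String × Int → Int × String → Int × Int × String × Int :=
  fun st p =>
    let positivo := if p.2 = "+" then st.1 + 1 else st.1
    let negativo := if p.2 = "+" then st.2.1 else st.2.1 + 1
    if p.1 = 0 then (positivo, negativo, p.2, st.2.2.2)
    else if p.2 ≠ st.2.2.1 then (positivo, negativo, p.2, st.2.2.2 + 1)
    else (positivo, negativo, p.2, st.2.2.2)

-- invariant for the fold over the tail (all indices ≥ 1)
theorem foldA_tail (xs : List String) : ∀ (s : Int), 1 ≤ s → ∀ (p n c : Int) (ant : String),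
    (PySem.List.enumerate xs s).foldl pvBodyA (p, n, ant, c)
      = (p + (xs.count "+" : Int),
         n + ((xs.length : Int) - (xs.count "+" : Int)),
         xs.getLastD ant,
         c + (((ant :: xs).zip xs).filter (fun q => q.1 ≠ q.2)).length) := by
  induction xs with
  | nil => intro s hs p n c ant; simp [PySem.List.enumerate_nil]
  | cons x xs ih =>
    intro s hs p n c ant
    rw [PySem.List.enumerate_cons, List.foldl_cons]
    have hstep : pvBodyA (p, n, ant, c) (s, x)
        = ((if x = "+" then p + 1 else p),
           (if x = "+" then n else n + 1),
           x,
           (if x ≠ ant then c + 1 else c)) := by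
      simp only [pvBodyA]
      have hs0 : ¬ (s = 0) := by omega
      by_cases hx : x = ant <;> simp [hs0, hx]
    rw [hstep, ih (s + 1) (by omega)]
    simp only [Prod.mk.injEq]
    refine ⟨?_, ?_, ?_, ?_⟩
    · by_cases hx : x = "+" <;> simp [hx] <;> ring
    · by_cases hx : x = "+" <;> simp [hx] <;> push_cast <;> ring
    · cases xs <;> simp [List.getLastD]
    · by_cases hx : x = ant
      · subst hx; simp [List.zip_cons_cons]
      · simp [List.zip_cons_cons, hx, Ne.symm hx]
        ring

-- ===== VERDICT (by name: the statement is the Claim_ definition above) =====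
theorem contarCorridas_spec : Claim_equal_contarCorridas := by
  intro datos _
  show contarCorridas datos = contarCorridas_alt datos
  have hbody : ∀ (l : List String), contarCorridas l
      = [((PySem.List.enumerate l).foldl pvBodyA (0, 0, "", 0)).1,
         ((PySem.List.enumerate l).foldl pvBodyA (0, 0, "", 0)).2.1,
         ((PySem.List.enumerate l).foldl pvBodyA (0, 0, "", 0)).2.2.2] := fun _ => rfl
  cases datos with
  | nil => rfl
  | cons x xs =>
    have hstep : pvBodyA ((0:Int), (0:Int), "", (0:Int)) ((0:Int), x)
        = ((if x = "+" then (0:Int) + 1 else 0),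
           (if x = "+" then (0:Int) else 0 + 1), x, (0:Int)) := by
      simp [pvBodyA]
    rw [hbody, PySem.List.enumerate_cons, List.foldl_cons, hstep,
      foldA_tail xs (0 + 1) (by omega)]
    simp only [contarCorridas_alt, PySem.List.slice_from_one, List.tail_cons,
      List.cons.injEq, and_true]
    refine ⟨?_, ?_, ?_⟩
    · simp [PySem.List.count_eq, List.count_cons]
      by_cases hx : x = "+" <;> simp [hx] <;> omega
    · simp [PySem.List.count_eq, List.count_cons]
      by_cases hx : x = "+" <;> simp [hx] <;> push_cast <;> ring
    · simp
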